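-- pv_equiv track=rewrite | github.com/MagicKisa/Rug-Pull-check | parsers/getjsonwithsourcecode.py | get_api_info
-- ===== SOURCE A (Python) =====
-- def get_api_info(apis_dict, name):
--     url = None
--     apikey = None
--     for api in apis_dict["apis"]:
--         if api["scan_name"] == name:
--             url = api["url"]
--             apikey = api["apikey"]
--     return (url, apikey)
-- ===== SOURCE B (Python) =====
-- def get_api_info(apis_dict, name):
--     for api in reversed(apis_dict["apis"]):
--         if api["scan_name"] == name:
--             return (api["url"], api["apikey"])
--     return (None, None)
-- ===== Notes on version B (the rewrite author's own statement) =====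
-- stated objective: simpler
-- what changed: Replaces accumulate-the-last-match-over-a-full-forward-scan with an early-exit reverse traversal that returns the first back-to-front match immediately.
import Mathlib
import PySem

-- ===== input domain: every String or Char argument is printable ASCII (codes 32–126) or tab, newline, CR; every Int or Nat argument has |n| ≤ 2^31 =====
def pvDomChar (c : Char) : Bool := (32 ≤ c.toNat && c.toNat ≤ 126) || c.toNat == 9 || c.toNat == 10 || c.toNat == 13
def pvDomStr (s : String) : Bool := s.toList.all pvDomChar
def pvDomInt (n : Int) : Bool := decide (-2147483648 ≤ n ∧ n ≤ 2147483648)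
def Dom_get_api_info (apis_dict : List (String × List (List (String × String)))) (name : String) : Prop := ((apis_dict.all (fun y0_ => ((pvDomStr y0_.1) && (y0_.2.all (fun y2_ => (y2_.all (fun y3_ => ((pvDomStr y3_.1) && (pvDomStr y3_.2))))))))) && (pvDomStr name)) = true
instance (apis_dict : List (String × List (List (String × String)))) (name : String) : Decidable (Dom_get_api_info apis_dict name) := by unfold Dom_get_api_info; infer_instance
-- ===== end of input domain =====

-- ===== PORT A =====
-- B returns the same value via a different decomposition: A accumulates the LAST forward match,
-- B early-exits on the FIRST match of the reversed list ("simpler" objective; return value only).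
-- A: forward scan keeping the LAST match's url/apikey.
def get_api_info (apis_dict : List (String × List (List (String × String)))) (name : String) : Option String × Option String :=
  -- apis_dict["apis"]: KeyError (excluded by Pre_) if absent; the port takes [] there.
  let apis := (List.lookup "apis" apis_dict).getD []
  apis.foldl (fun (st : Option String × Option String) api =>
    -- api["scan_name"]: KeyError (excluded by Pre_) if absent; get? = none never equals some name.
    if List.lookup "scan_name" api = some name then
      (List.lookup "url" api, List.lookup "apikey" api)
    else st) (none, none)

-- ===== PORT B =====
-- B: scan the reversed list, return on the FIRST match.
def get_api_info_altGo (name : String) : List (List (String × String)) → Option String × Option String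
  | [] => (none, none)
  | api :: rest =>
    if List.lookup "scan_name" api = some name then
      (List.lookup "url" api, List.lookup "apikey" api)
    else get_api_info_altGo name rest

def get_api_info_alt (apis_dict : List (String × List (List (String × String)))) (name : String) : Option String × Option String :=
  get_api_info_altGo name ((List.lookup "apis" apis_dict).getD []).reverse

-- ===== PRECONDITION & SPEC =====
-- Pre_ excludes exactly the inputs where Python A raises KeyError: the "apis" key absent,
-- an entry without "scan_name", or a matching entry without "url" or "apikey".
def Pre_get_api_info (apis_dict : List (String × List (List (String × String)))) (name : String) : Prop :=
  (List.lookup "apis" apis_dict).isSome = true ∧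
  ∀ api ∈ (List.lookup "apis" apis_dict).getD [],
    (List.lookup "scan_name" api).isSome = true ∧
    (List.lookup "scan_name" api = some name →
      (List.lookup "url" api).isSome = true ∧ (List.lookup "apikey" api).isSome = true)
instance (apis_dict : List (String × List (List (String × String)))) (name : String) : Decidable (Pre_get_api_info apis_dict name) := by unfold Pre_get_api_info; infer_instance

def pvWitness_get_api_info : (List (String × List (List (String × String)))) × String :=
  ([("apis", [[("scan_name", "etherscan"), ("url", "https://e"), ("apikey", "k1")],
              [("scan_name", "bscscan"), ("url", "https://b"), ("apikey", "k2")]])], "bscscan")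

def Spec_get_api_info (apis_dict : List (String × List (List (String × String)))) (name : String) (out : Option String × Option String) : Prop := out = get_api_info_alt apis_dict name
instance (apis_dict : List (String × List (List (String × String)))) (name : String) (out : Option String × Option String) : Decidable (Spec_get_api_info apis_dict name out) := by unfold Spec_get_api_info; infer_instance

-- ===== CLAIM (what is proved, stated in full; the proofs are below) =====
def Claim_equal_get_api_info : Prop := ∀ (apis_dict : List (String × List (List (String × String)))) (name : String), Dom_get_api_info apis_dict name → Pre_get_api_info apis_dict name → Spec_get_api_info apis_dict name (get_api_info apis_dict name)

-- ===== LEMMAS AND PROOFS =====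
-- Last forward match = first reverse match: proved by reverse induction on the list.
theorem foldl_eq_altGo_reverse (name : String) (l : List (List (String × String)))
    (st : Option String × Option String)
    (hst : st = (none, none) ∨ st = get_api_info_altGo name []) :
    l.foldl (fun (st : Option String × Option String) api =>
      if List.lookup "scan_name" api = some name then
        (List.lookup "url" api, List.lookup "apikey" api)
      else st) st = get_api_info_altGo name l.reverse := by
  induction l using List.reverseRecOn with
  | nil =>
    rcases hst with h | h <;> simp [h, get_api_info_altGo]
  | append_singleton l x ih =>
    rw [List.foldl_append, List.reverse_append]
    simp only [List.foldl_cons, List.foldl_nil, List.reverse_singleton, List.singleton_append,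
      get_api_info_altGo]
    split_ifs with h
    · rfl
    · exact ih

-- ===== VERDICT (by name: the statement is the Claim_ definition above) =====
theorem get_api_info_spec : Claim_equal_get_api_info := by
  intro apis_dict name _ _
  unfold Spec_get_api_info get_api_info get_api_info_alt
  exact foldl_eq_altGo_reverse name _ _ (Or.inl rfl)
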